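-- pv_equiv track=rewrite | github.com/Sunip88/exercises | code_wars.py | students_second_worst
-- ===== SOURCE A (Python) =====
-- def students_second_worst(list):
--     list.sort(key=lambda x: x[1])
--
--     first = list[0]
--     result = []
--     for i in list:
--         if i[1] != first[1]:
--             if result:
--                 if result[0][1] == i[1]:
--                     result.append(i)
--             else:
--                 result.append(i)
--     result.sort(key=lambda x: x[0])
--     result_str = "\n".join(x[0] for x in result)
--     return result_str
-- ===== SOURCE B (Python) =====
-- def students_second_worst(list):
--     worst = min(x[1] for x in list)
--     higher = [x[1] for x in list if x[1] > worst]
--     if not higher: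
--         return ""
--     second = min(higher)
--     return "\n".join(sorted(x[0] for x in list if x[1] == second))
-- ===== Notes on version B (the rewrite author's own statement) =====
-- stated objective: simpler
-- what changed: Instead of sorting the whole list by score and replaying it through a running-first-group filter loop, B takes the minimum score, the minimum of the scores above it, filters the matching names and sorts only those; B does not mutate the argument (A sorts it in place).
import Mathlib
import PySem

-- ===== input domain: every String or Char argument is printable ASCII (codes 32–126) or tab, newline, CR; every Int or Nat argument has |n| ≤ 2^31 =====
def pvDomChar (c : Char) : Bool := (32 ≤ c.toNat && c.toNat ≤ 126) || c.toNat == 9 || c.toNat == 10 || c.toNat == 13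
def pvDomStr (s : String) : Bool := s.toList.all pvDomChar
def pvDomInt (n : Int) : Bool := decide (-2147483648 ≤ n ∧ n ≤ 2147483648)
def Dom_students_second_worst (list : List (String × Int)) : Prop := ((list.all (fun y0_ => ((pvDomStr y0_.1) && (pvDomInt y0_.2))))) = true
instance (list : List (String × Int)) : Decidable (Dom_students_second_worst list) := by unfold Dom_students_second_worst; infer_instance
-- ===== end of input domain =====

-- B finds the second-worst score by two min passes instead of sorting the whole list, and sorts only
-- the matching names (objective: simpler). Equivalence is about the RETURN value only: A sorts the
-- argument list in place, B does not mutate it.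

-- ===== PORT A =====
-- the body of A's for-loop: skip items with the worst score; start/extend the second group
def pvStepA (firstScore : Int) (result : List (String × Int)) (i : String × Int) : List (String × Int) :=
  if i.2 ≠ firstScore then
    match result with
    | [] => [i]
    | r0 :: _ => if r0.2 = i.2 then result ++ [i] else result
  else result

def students_second_worst (list : List (String × Int)) : String :=
  match PySem.List.sorted list (fun x => x.2) false with
  | [] => ""  -- unreachable under Pre_: list[0] raises IndexError on the empty list
  | first :: tail =>
    let result := (first :: tail).foldl (pvStepA first.2) []
    let resultSorted := PySem.List.sorted result (fun x => x.1) false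
    PySem.Str.join "\n" (resultSorted.map Prod.fst)

-- ===== PORT B =====
def students_second_worst_alt (list : List (String × Int)) : String :=
  match PySem.List.min? (list.map Prod.snd) (fun v => v) with
  | none => ""  -- unreachable under Pre_: min() raises ValueError on the empty list
  | some worst =>
    let higher := (list.filter (fun x => worst < x.2)).map Prod.snd
    match PySem.List.min? higher (fun v => v) with
    | none => ""
    | some second =>
      PySem.Str.join "\n"
        (PySem.List.sorted ((list.filter (fun x => x.2 = second)).map Prod.fst) (fun x => x) false)

-- ===== PRECONDITION & SPEC =====
-- A raises IndexError (and B ValueError) on the empty list; nothing else is excluded.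
def Pre_students_second_worst (list : List (String × Int)) : Prop := list ≠ []
instance (list : List (String × Int)) : Decidable (Pre_students_second_worst list) := by unfold Pre_students_second_worst; infer_instance
def pvWitness_students_second_worst : (List (String × Int)) := [("alice", 3), ("bob", 1), ("carl", 2)]

def Spec_students_second_worst (list : List (String × Int)) (out : String) : Prop := out = students_second_worst_alt list
instance (list : List (String × Int)) (out : String) : Decidable (Spec_students_second_worst list out) := by unfold Spec_students_second_worst; infer_instance

-- ===== CLAIM (what is proved, stated in full; the proofs are below) =====
def Claim_equal_students_second_worst : Prop := ∀ (list : List (String × Int)), Dom_students_second_worst list → Pre_students_second_worst list → Spec_students_second_worst list (students_second_worst list)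

-- ===== LEMMAS AND PROOFS =====

-- once the accumulator holds a first mismatching item r0, the loop appends exactly the items with score r0.2
theorem pv_loopA_cons (f : Int) (r0 : String × Int) (h : ¬ r0.2 = f) (t : List (String × Int)) :
    ∀ rest : List (String × Int),
      t.foldl (pvStepA f) (r0 :: rest) = (r0 :: rest) ++ t.filter (fun i => decide (i.2 = r0.2)) := by
  induction t with
  | nil => intro rest; simp
  | cons i t ih =>
    intro rest
    by_cases hi : i.2 = f
    · have hne : ¬ i.2 = r0.2 := fun hh => h (hh ▸ hi)
      simp only [List.foldl_cons, List.filter_cons]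
      rw [show pvStepA f (r0 :: rest) i = r0 :: rest by simp [pvStepA, hi]]
      simp [hne, ih rest]
    · by_cases hr : r0.2 = i.2
      · simp only [List.foldl_cons, List.filter_cons]
        rw [show pvStepA f (r0 :: rest) i = r0 :: (rest ++ [i]) by simp [pvStepA, hi, hr]]
        rw [ih (rest ++ [i])]
        simp [hr.symm]
      · simp only [List.foldl_cons, List.filter_cons]
        rw [show pvStepA f (r0 :: rest) i = r0 :: rest by simp [pvStepA, hi, hr]]
        have : ¬ i.2 = r0.2 := fun hh => hr hh.symm
        simp [this, ih rest]

theorem pv_loopA_nil_of_filter_nil (f : Int) :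
    ∀ t : List (String × Int), t.filter (fun i => decide (¬ i.2 = f)) = [] →
      t.foldl (pvStepA f) [] = [] := by
  intro t
  induction t with
  | nil => intro _; rfl
  | cons i t ih =>
    intro h
    by_cases hi : i.2 = f
    · simp only [List.filter_cons, hi] at h
      simp only [List.foldl_cons]
      rw [show pvStepA f [] i = [] by simp [pvStepA, hi]]
      exact ih (by simpa using h)
    · simp [hi] at h

theorem pv_loopA_nil_of_filter_cons (f : Int) (r0 : String × Int) (rs : List (String × Int)) :
    ∀ t : List (String × Int), t.filter (fun i => decide (¬ i.2 = f)) = r0 :: rs →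
      t.foldl (pvStepA f) [] = t.filter (fun i => decide (i.2 = r0.2)) := by
  intro t
  induction t with
  | nil => intro h; simp at h
  | cons i t ih =>
    intro h
    by_cases hi : i.2 = f
    · have hne : ¬ i.2 = r0.2 := by
        intro hh
        have hr0 : r0 ∈ t.filter (fun i => decide (¬ i.2 = f)) := by
          have : t.filter (fun i => decide (¬ i.2 = f)) = r0 :: rs := by simpa [List.filter_cons, hi] using h
          rw [this]; exact List.mem_cons_self
        have := (List.mem_filter.mp hr0).2
        simp at this
        exact this (hh ▸ hi)
      simp only [List.foldl_cons, List.filter_cons]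
      rw [show pvStepA f [] i = [] by simp [pvStepA, hi]]
      rw [ih (by simpa [List.filter_cons, hi] using h)]
      simp [hne]
    · have hr0 : i = r0 := by
        have : i :: t.filter (fun i => decide (¬ i.2 = f)) = r0 :: rs := by
          simpa [List.filter_cons, hi] using h
        exact (List.cons.injEq .. ▸ this : _ ∧ _).1
      simp only [List.foldl_cons, List.filter_cons]
      rw [show pvStepA f [] i = [i] by simp [pvStepA, hi]]
      rw [pv_loopA_cons f i hi t []]
      subst hr0
      simp

-- sorting pairs by name then projecting the names = sorting the projected names
theorem pv_map_fst_sorted (X : List (String × Int)) :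
    PySem.List.sorted (X.map Prod.fst) (fun x => x) false
      = (PySem.List.sorted X (fun x => x.1) false).map Prod.fst := by
  apply PySem.List.sorted_id_eq_of_perm_of_pairwise
  · exact (PySem.List.sorted_perm X (fun x => x.1) false).map Prod.fst
  · exact List.pairwise_map.mpr (PySem.List.sorted_pairwise X (fun x => x.1))

-- ===== VERDICT (by name: the statement is the Claim_ definition above) =====
theorem students_second_worst_spec : Claim_equal_students_second_worst := by
  intro list _ hpre
  unfold Spec_students_second_worst students_second_worst students_second_worst_alt
  cases hs : PySem.List.sorted list (fun x => x.2) false with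
  | nil => exact absurd ((PySem.List.sorted_eq_nil_iff list _ false).mp hs) hpre
  | cons first tail =>
    have hmem : ∀ x ∈ first :: tail, x ∈ list := by
      intro x hx
      exact (PySem.List.mem_sorted list (fun x => x.2) false x).mp (hs ▸ hx)
    have hfirst_mem : first ∈ list := hmem first List.mem_cons_self
    have hmin : ∀ y ∈ list, first.2 ≤ y.2 := PySem.List.key_head_sorted_le list (fun x => x.2) hs
    -- B's worst = first.2
    have hworst : PySem.List.min? (list.map Prod.snd) (fun v => v) = some first.2 := by
      cases hm : PySem.List.min? (list.map Prod.snd) (fun v => v) with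
      | none =>
        have := List.map_eq_nil_iff.mp ((PySem.List.min?_eq_none_iff _ _).mp hm)
        exact absurd this hpre
      | some w =>
        obtain ⟨y, hy, hyw⟩ := List.mem_map.mp (PySem.List.min?_mem hm)
        have h1 : w ≤ first.2 := PySem.List.min?_isMin hm first.2 (List.mem_map_of_mem hfirst_mem)
        have h2 : first.2 ≤ w := hyw ▸ hmin y hy
        rw [le_antisymm h1 h2]
    simp only [hworst]
    -- switch A's "score ≠ first" filter to "score > first" on members
    have hcong : ∀ t : List (String × Int), (∀ x ∈ t, x ∈ list) →
        t.filter (fun i => decide (¬ i.2 = first.2)) = t.filter (fun i => decide (first.2 < i.2)) := by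
      intro t ht
      apply List.filter_congr
      intro x hx
      have := hmin x (ht x hx)
      simp only [decide_eq_decide]
      omega
    have hpermF : ∀ q : (String × Int) → Bool,
        ((first :: tail).filter q).Perm (list.filter q) := by
      intro q
      have := (PySem.List.sorted_perm list (fun x => x.2) false).filter q
      rwa [hs] at this
    cases hF : (first :: tail).filter (fun i => decide (first.2 < i.2)) with
    | nil =>
      -- only one distinct score: both sides return ""
      have hA : (first :: tail).foldl (pvStepA first.2) [] = [] :=
        pv_loopA_nil_of_filter_nil first.2 _ ((hcong _ hmem).trans hF)
      have hBfilter : list.filter (fun x => decide (first.2 < x.2)) = [] :=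
        ((hF ▸ hpermF (fun i => decide (first.2 < i.2))).symm).eq_nil
      simp only [hA, hBfilter]
      rfl
    | cons r0 rs =>
      have hr0f : r0 ∈ (first :: tail).filter (fun i => decide (first.2 < i.2)) := by
        rw [hF]; exact List.mem_cons_self
      have hr0list : r0 ∈ list := hmem r0 (List.mem_filter.mp hr0f).1
      have hr0gt : first.2 < r0.2 := by simpa using (List.mem_filter.mp hr0f).2
      -- r0.2 is minimal among scores above first.2
      have hr0min : ∀ y ∈ list, first.2 < y.2 → r0.2 ≤ y.2 := by
        intro y hy hygt
        have hys : y ∈ first :: tail := by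
          rw [← hs]; exact (PySem.List.mem_sorted list (fun x => x.2) false y).mpr hy
        have hyf : y ∈ (first :: tail).filter (fun i => decide (first.2 < i.2)) :=
          List.mem_filter.mpr ⟨hys, by simpa using hygt⟩
        have hpw : ((first :: tail).filter (fun i => decide (first.2 < i.2))).Pairwise
            (fun a b => a.2 ≤ b.2) := by
          have := PySem.List.sorted_pairwise list (fun x => x.2)
          rw [hs] at this
          exact this.filter _
        rw [hF] at hpw hyf
        rcases List.mem_cons.mp hyf with rfl | hyrs
        · exact le_refl _
        · exact (List.pairwise_cons.mp hpw).1 y hyrs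
      -- A's loop result
      have hA : (first :: tail).foldl (pvStepA first.2) []
          = (first :: tail).filter (fun i => decide (i.2 = r0.2)) :=
        pv_loopA_nil_of_filter_cons first.2 r0 rs _ ((hcong _ hmem).trans hF)
      -- B's second = r0.2
      have hr0h : r0.2 ∈ (list.filter (fun x => decide (first.2 < x.2))).map Prod.snd :=
        List.mem_map_of_mem (List.mem_filter.mpr ⟨hr0list, by simpa using hr0gt⟩)
      have hsecond : PySem.List.min? ((list.filter (fun x => decide (first.2 < x.2))).map Prod.snd)
          (fun v => v) = some r0.2 := by
        cases hm2 : PySem.List.min? ((list.filter (fun x => decide (first.2 < x.2))).map Prod.snd)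
            (fun v => v) with
        | none =>
          rw [PySem.List.min?_eq_none_iff] at hm2
          rw [hm2] at hr0h
          exact absurd hr0h (List.not_mem_nil)
        | some sec =>
          obtain ⟨y, hy, hysec⟩ := List.mem_map.mp (PySem.List.min?_mem hm2)
          have hy' := List.mem_filter.mp hy
          have h1 : sec ≤ r0.2 := PySem.List.min?_isMin hm2 r0.2 hr0h
          have h2 : r0.2 ≤ sec := hysec ▸ hr0min y hy'.1 (by simpa using hy'.2)
          rw [le_antisymm h1 h2]
      simp only [hA, hsecond]
      congr 1
      rw [← pv_map_fst_sorted]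
      exact PySem.List.sorted_eq_sorted_of_perm _ _ (fun x => x) Function.injective_id
        ((hpermF (fun i => decide (i.2 = r0.2))).map Prod.fst)
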